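-- pv_equiv track=rewrite | github.com/MasterAI-Inc/libauto | cio/aa_controller_v3/proto.py | _crc_xmodem_update
-- ===== SOURCE A (Python) =====
-- def _crc_xmodem_update(crc, data):
--     crc = (crc ^ (data << 8)) & 0xFFFF
--     for i in range(8):
--         if crc & 0x8000:
--             crc = ((crc << 1) ^ 0x1021) & 0xFFFF
--         else:
--             crc = (crc << 1) & 0xFFFF
--     return crc
-- ===== SOURCE B (Python) =====
-- # Table-driven XMODEM CRC-16: precompute a 256-entry table once, then one lookup per byte.
-- def _crc_table_entry(b):
--     v = b << 8
--     for _ in range(8):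
--         if v & 0x8000:
--             v = ((v << 1) ^ 0x1021) & 0xFFFF
--         else:
--             v = (v << 1) & 0xFFFF
--     return v
--
-- _CRC_TABLE = [_crc_table_entry(b) for b in range(256)]
--
-- def _crc_xmodem_update(crc, data):
--     return ((crc << 8) & 0xFF00) ^ _CRC_TABLE[((crc >> 8) ^ data) & 0xFF]
-- ===== Notes on version B (the rewrite author's own statement) =====
-- stated objective: idiomatic
-- what changed: Replaced the per-call 8-iteration bit-by-bit loop with the standard table-driven CRC: a 256-entry table precomputed once at import, so each call is a single shift/mask/xor plus one table lookup.
import Mathlib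
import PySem

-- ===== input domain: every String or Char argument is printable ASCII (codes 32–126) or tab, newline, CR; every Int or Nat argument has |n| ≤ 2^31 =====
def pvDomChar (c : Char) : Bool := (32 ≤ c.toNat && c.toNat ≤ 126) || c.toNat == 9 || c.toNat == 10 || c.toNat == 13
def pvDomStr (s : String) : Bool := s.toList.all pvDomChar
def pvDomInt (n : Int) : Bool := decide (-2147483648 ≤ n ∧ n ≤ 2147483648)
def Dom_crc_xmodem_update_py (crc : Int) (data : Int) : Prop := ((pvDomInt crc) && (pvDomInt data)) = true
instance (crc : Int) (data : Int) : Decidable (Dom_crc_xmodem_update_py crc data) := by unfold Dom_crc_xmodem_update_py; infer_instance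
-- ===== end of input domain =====

-- B replaces A's per-call 8-iteration bit loop with the standard table-driven CRC: a 256-entry table precomputed once; each call is one lookup plus shift/mask/xor.

-- ===== PORT A =====
def crc_xmodem_update_py (crc : Int) (data : Int) : Int :=
  (PySem.List.pyRange 0 8 1).foldl (fun crc _i =>
    if PySem.Int.band crc 32768 ≠ 0 then
      PySem.Int.band (PySem.Int.bxor (crc <<< (1:Int)) 4129) 65535
    else
      PySem.Int.band (crc <<< (1:Int)) 65535)
    (PySem.Int.band (PySem.Int.bxor crc (data <<< (8:Int))) 65535)

-- ===== PORT B =====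
-- _crc_table_entry(b): the 8-step bit loop, run once per table slot at "import time"
def crcTableEntry (b : Int) : Int :=
  (PySem.List.pyRange 0 8 1).foldl (fun v _i =>
    if PySem.Int.band v 32768 ≠ 0 then
      PySem.Int.band (PySem.Int.bxor (v <<< (1:Int)) 4129) 65535
    else
      PySem.Int.band (v <<< (1:Int)) 65535) (b <<< (8:Int))

-- _CRC_TABLE = [_crc_table_entry(b) for b in range(256)]
def crcTable : List Int := (PySem.List.pyRange 0 256 1).map crcTableEntry

def crc_xmodem_update_py_alt (crc : Int) (data : Int) : Int :=
  PySem.Int.bxor (PySem.Int.band (crc <<< (8:Int)) 65280)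
    (PySem.List.pyGetD crcTable (PySem.Int.band (PySem.Int.bxor (crc >>> (8:Int)) data) 255) 0)

-- ===== PRECONDITION & SPEC =====
def Spec_crc_xmodem_update_py (crc : Int) (data : Int) (out : Int) : Prop := out = crc_xmodem_update_py_alt crc data
instance (crc : Int) (data : Int) (out : Int) : Decidable (Spec_crc_xmodem_update_py crc data out) := by unfold Spec_crc_xmodem_update_py; infer_instance

-- ===== CLAIM (what is proved, stated in full; the proofs are below) =====
def Claim_equal_crc_xmodem_update_py : Prop := ∀ (crc : Int) (data : Int), Dom_crc_xmodem_update_py crc data → Spec_crc_xmodem_update_py crc data (crc_xmodem_update_py crc data)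

-- ===== LEMMAS AND PROOFS =====

-- Nat facts about 16-bit masking and complement
theorem nat_and_65535 (m : Nat) : m &&& 65535 = m % 65536 := by
  have := Nat.and_two_pow_sub_one_eq_mod m 16; norm_num at this; exact this

theorem nat_and_255 (m : Nat) : m &&& 255 = m % 256 := by
  have := Nat.and_two_pow_sub_one_eq_mod m 8; norm_num at this; exact this

theorem xor_mod_two (a b : Nat) : (a ^^^ b) % 2 = (a % 2) ^^^ (b % 2) := by
  have := Nat.xor_mod_two_pow (a := a) (b := b) (n := 1); simpa using this

theorem compl_pow (k : Nat) : ∀ z : Nat, z < 2 ^ k → (2 ^ k - 1) ^^^ z = 2 ^ k - 1 - z := by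
  induction k with
  | zero => intro z hz; interval_cases z; decide
  | succ k ih =>
    intro z hz
    have hp : 2 ^ (k + 1) = 2 * 2 ^ k := by ring
    have hd : ((2 ^ (k + 1) - 1) ^^^ z) / 2 = 2 ^ k - 1 - z / 2 := by
      rw [Nat.xor_div_two]
      have h1 : (2 ^ (k + 1) - 1) / 2 = 2 ^ k - 1 := by omega
      rw [h1, ih (z / 2) (by omega)]
    have hm : ((2 ^ (k + 1) - 1) ^^^ z) % 2 = 1 - z % 2 := by
      rw [xor_mod_two]
      have h1 : (2 ^ (k + 1) - 1) % 2 = 1 := by omega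
      rw [h1]
      have : z % 2 = 0 ∨ z % 2 = 1 := by omega
      rcases this with h | h <;> rw [h] <;> decide
    have hz2 : z / 2 ≤ 2 ^ k - 1 := by omega
    omega

theorem xm16 (p q : Nat) : (p ^^^ q) % 65536 = p % 65536 ^^^ q % 65536 := by
  have := Nat.xor_mod_two_pow (a := p) (b := q) (n := 16); norm_num at this; exact this

theorem xm8 (p q : Nat) : (p ^^^ q) % 256 = p % 256 ^^^ q % 256 := by
  have := Nat.xor_mod_two_pow (a := p) (b := q) (n := 8); norm_num at this; exact this

theorem c16 (z : Nat) (hz : z < 65536) : 65535 ^^^ z = 65535 - z := by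
  have := compl_pow 16 z (by norm_num; omega); norm_num at this; exact this

theorem c8 (z : Nat) (hz : z < 256) : 255 ^^^ z = 255 - z := by
  have := compl_pow 8 z (by norm_num; omega); norm_num at this; exact this

-- Python & with an all-ones mask is emod
theorem band_65535 (a : Int) : PySem.Int.band a 65535 = a % 65536 := by
  unfold PySem.Int.band
  by_cases h : 0 ≤ a
  · simp [h, (by norm_num : (0:Int) ≤ 65535), nat_and_65535]
  · simp [h, (by norm_num : (0:Int) ≤ 65535), Nat.and_comm 65535, nat_and_65535]; omega

theorem band_255 (a : Int) : PySem.Int.band a 255 = a % 256 := by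
  unfold PySem.Int.band
  by_cases h : 0 ≤ a
  · simp [h, (by norm_num : (0:Int) ≤ 255), nat_and_255]
  · simp [h, (by norm_num : (0:Int) ≤ 255), Nat.and_comm 255, nat_and_255]; omega

-- Python ^ commutes with emod by a power of two (16- and 8-bit instances)
theorem bxor_emod_65536 (a b : Int) :
    (PySem.Int.bxor a b) % 65536 = (((a % 65536).toNat ^^^ (b % 65536).toNat : Nat) : Int) := by
  unfold PySem.Int.bxor
  by_cases ha : 0 ≤ a <;> by_cases hb : 0 ≤ b <;> simp only [ha, hb, if_pos, if_neg, not_false_iff]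
  · have e1 : (a % 65536).toNat = a.toNat % 65536 := by omega
    have e2 : (b % 65536).toNat = b.toNat % 65536 := by omega
    have h := xm16 a.toNat b.toNat
    rw [e1, e2]; omega
  · have e1 : (a % 65536).toNat = a.toNat % 65536 := by omega
    have e2 : (b % 65536).toNat = 65535 - ((-b - 1).toNat % 65536) := by omega
    rw [e1, e2, ← c16 _ (by omega)]
    have hswap : a.toNat % 65536 ^^^ (65535 ^^^ (-b - 1).toNat % 65536)
        = 65535 ^^^ (a.toNat % 65536 ^^^ (-b - 1).toNat % 65536) := by ac_rfl
    have hlt : a.toNat % 65536 ^^^ (-b - 1).toNat % 65536 < 65536 :=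
      Nat.xor_lt_two_pow (n := 16) (by omega) (by omega)
    rw [hswap, c16 _ hlt, ← xm16]
    omega
  · have e1 : (a % 65536).toNat = 65535 - ((-a - 1).toNat % 65536) := by omega
    have e2 : (b % 65536).toNat = b.toNat % 65536 := by omega
    rw [e1, e2, ← c16 _ (by omega)]
    have hswap : (65535 ^^^ (-a - 1).toNat % 65536) ^^^ b.toNat % 65536
        = 65535 ^^^ ((-a - 1).toNat % 65536 ^^^ b.toNat % 65536) := by ac_rfl
    have hlt : (-a - 1).toNat % 65536 ^^^ b.toNat % 65536 < 65536 :=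
      Nat.xor_lt_two_pow (n := 16) (by omega) (by omega)
    rw [hswap, c16 _ hlt, ← xm16]
    omega
  · have e1 : (a % 65536).toNat = 65535 - ((-a - 1).toNat % 65536) := by omega
    have e2 : (b % 65536).toNat = 65535 - ((-b - 1).toNat % 65536) := by omega
    rw [e1, e2, ← c16 _ (by omega), ← c16 _ (by omega)]
    have hswap : (65535 ^^^ (-a - 1).toNat % 65536) ^^^ (65535 ^^^ (-b - 1).toNat % 65536)
        = (65535 ^^^ 65535) ^^^ ((-a - 1).toNat % 65536 ^^^ (-b - 1).toNat % 65536) := by ac_rfl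
    rw [hswap, Nat.xor_self, Nat.zero_xor, ← xm16]
    omega

theorem bxor_emod_256 (a b : Int) :
    (PySem.Int.bxor a b) % 256 = (((a % 256).toNat ^^^ (b % 256).toNat : Nat) : Int) := by
  unfold PySem.Int.bxor
  by_cases ha : 0 ≤ a <;> by_cases hb : 0 ≤ b <;> simp only [ha, hb, if_pos, if_neg, not_false_iff]
  · have e1 : (a % 256).toNat = a.toNat % 256 := by omega
    have e2 : (b % 256).toNat = b.toNat % 256 := by omega
    have h := xm8 a.toNat b.toNat
    rw [e1, e2]; omega
  · have e1 : (a % 256).toNat = a.toNat % 256 := by omega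
    have e2 : (b % 256).toNat = 255 - ((-b - 1).toNat % 256) := by omega
    rw [e1, e2, ← c8 _ (by omega)]
    have hswap : a.toNat % 256 ^^^ (255 ^^^ (-b - 1).toNat % 256)
        = 255 ^^^ (a.toNat % 256 ^^^ (-b - 1).toNat % 256) := by ac_rfl
    have hlt : a.toNat % 256 ^^^ (-b - 1).toNat % 256 < 256 :=
      Nat.xor_lt_two_pow (n := 8) (by omega) (by omega)
    rw [hswap, c8 _ hlt, ← xm8]
    omega
  · have e1 : (a % 256).toNat = 255 - ((-a - 1).toNat % 256) := by omega
    have e2 : (b % 256).toNat = b.toNat % 256 := by omega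
    rw [e1, e2, ← c8 _ (by omega)]
    have hswap : (255 ^^^ (-a - 1).toNat % 256) ^^^ b.toNat % 256
        = 255 ^^^ ((-a - 1).toNat % 256 ^^^ b.toNat % 256) := by ac_rfl
    have hlt : (-a - 1).toNat % 256 ^^^ b.toNat % 256 < 256 :=
      Nat.xor_lt_two_pow (n := 8) (by omega) (by omega)
    rw [hswap, c8 _ hlt, ← xm8]
    omega
  · have e1 : (a % 256).toNat = 255 - ((-a - 1).toNat % 256) := by omega
    have e2 : (b % 256).toNat = 255 - ((-b - 1).toNat % 256) := by omega
    rw [e1, e2, ← c8 _ (by omega), ← c8 _ (by omega)]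
    have hswap : (255 ^^^ (-a - 1).toNat % 256) ^^^ (255 ^^^ (-b - 1).toNat % 256)
        = (255 ^^^ 255) ^^^ ((-a - 1).toNat % 256 ^^^ (-b - 1).toNat % 256) := by ac_rfl
    rw [hswap, Nat.xor_self, Nat.zero_xor, ← xm8]
    omega

-- disjoint xor is addition
theorem xor_mul256_add (q r : Nat) (hr : r < 256) : (256 * q) ^^^ r = 256 * q + r := by
  apply Nat.eq_of_testBit_eq; intro i
  rw [Nat.testBit_xor, show 256 * q = 2 ^ 8 * q by ring,
      Nat.testBit_two_pow_mul_add q (by omega : r < 2 ^ 8) i,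
      show 2 ^ 8 * q = q * 2 ^ 8 by ring, Nat.testBit_mul_two_pow]
  by_cases hi : i < 8
  · have h8 : ¬ 8 ≤ i := by omega
    simp [hi, h8]
  · have h8 : 8 ≤ i := by omega
    have hri : r.testBit i = false :=
      Nat.testBit_lt_two_pow (lt_of_lt_of_le hr (Nat.pow_le_pow_right (by norm_num : 0 < 2) h8))
    simp [hi, h8, hri]

-- (m*256) & 0xFF00 keeps the low byte of m, shifted up
theorem nat_mul256_and_65280 (m : Nat) : (m * 256) &&& 65280 = m % 256 * 256 := by
  rw [show (65280:Nat) = 255 <<< 8 from rfl, show m * 256 = m <<< 8 from by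
        rw [Nat.shiftLeft_eq],
      ← Nat.shiftLeft_and_distrib, nat_and_255]
  rw [Nat.shiftLeft_eq]

theorem band_mul256_65280 (c : Int) : PySem.Int.band (c * 256) 65280 = (c % 256) * 256 := by
  unfold PySem.Int.band
  by_cases h : 0 ≤ c
  · rw [if_pos (by positivity), if_pos (by norm_num : (0:Int) ≤ 65280)]
    rw [show (c * 256).toNat = c.toNat * 256 from by omega,
        show (65280:Int).toNat = 65280 from rfl, nat_mul256_and_65280]
    omega
  · rw [if_neg (by omega : ¬ 0 ≤ c * 256), if_pos (by norm_num : (0:Int) ≤ 65280)]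
    rw [show (-(c * 256) - 1).toNat = (-c - 1).toNat * 256 + 255 from by omega]
    rw [show (65280:Int).toNat = 65280 from rfl]
    rw [show (-c - 1).toNat * 256 + 255 = (256 * (-c - 1).toNat) ^^^ 255 from by
        rw [xor_mul256_add _ 255 (by omega)]; ring]
    rw [Nat.and_xor_distrib_left, show (65280:Nat) &&& 255 = 0 from rfl,
        Nat.and_comm 65280, show 256 * (-c - 1).toNat = (-c - 1).toNat * 256 from by ring,
        nat_mul256_and_65280, Nat.xor_zero]
    omega

-- Nat-level model of one CRC bit step and of the 8-step loop
def nstep (x : Nat) : Nat :=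
  if x &&& 32768 ≠ 0 then ((x <<< 1) ^^^ 4129) &&& 65535 else (x <<< 1) &&& 65535

def nloop : Nat → Nat → Nat
  | 0, x => x
  | k + 1, x => nloop k (nstep x)

theorem and_32768_eq_zero (l : Nat) (hl : l < 32768) : l &&& 32768 = 0 := by
  rw [show (32768:Nat) = 2 ^ 15 from rfl, Nat.and_two_pow,
      Nat.testBit_lt_two_pow (by omega : l < 2 ^ 15)]
  rfl

-- low bits ride along unchanged through the bit loop
theorem nloop_split (k : Nat) : ∀ h l : Nat, l * 2 ^ k < 65536 →
    nloop k (h ^^^ l) = nloop k h ^^^ (l * 2 ^ k) := by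
  induction k with
  | zero => intro h l _; simp [nloop]
  | succ k ih =>
    intro h l hl
    have h2k : 2 ≤ 2 ^ (k + 1) := by
      have := Nat.one_le_two_pow (n := k); rw [pow_succ]; omega
    have hl2 : l * 2 < 65536 := by
      have := Nat.mul_le_mul_left l h2k; omega
    have hl1 : l < 32768 := by omega
    have hll : (l <<< 1) &&& 65535 = l <<< 1 := by
      rw [nat_and_65535, Nat.shiftLeft_eq]; norm_num; omega
    have hstep : nstep (h ^^^ l) = nstep h ^^^ (l <<< 1) := by
      unfold nstep
      have hcond : (h ^^^ l) &&& 32768 = h &&& 32768 := by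
        rw [Nat.and_xor_distrib_right, and_32768_eq_zero l hl1, Nat.xor_zero]
      rw [hcond, Nat.shiftLeft_xor_distrib]
      split_ifs with hc
      · have hre : ((h <<< 1) ^^^ (l <<< 1)) ^^^ 4129 = ((h <<< 1) ^^^ 4129) ^^^ (l <<< 1) := by
          ac_rfl
        rw [hre, Nat.and_xor_distrib_right, hll]
      · rw [Nat.and_xor_distrib_right, hll]
    show nloop k (nstep (h ^^^ l)) = nloop k (nstep h) ^^^ l * 2 ^ (k + 1)
    rw [hstep, ih (nstep h) (l <<< 1) (by
      rw [Nat.shiftLeft_eq, pow_succ] at *; ring_nf; ring_nf at hl; omega)]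
    rw [Nat.shiftLeft_eq, pow_succ]; ring_nf

-- the key Nat identity behind the table lookup
theorem nloop8_table (cn dn : Nat) :
    nloop 8 (cn ^^^ dn * 256) = (cn % 256 * 256) ^^^ nloop 8 ((cn / 256 ^^^ dn) <<< 8) := by
  have harg : ((cn / 256 ^^^ dn) <<< 8) ^^^ cn % 256 = cn ^^^ dn * 256 := by
    rw [Nat.shiftLeft_xor_distrib, Nat.shiftLeft_eq, Nat.shiftLeft_eq]
    norm_num
    rw [show (cn / 256 * 256) ^^^ (dn * 256) ^^^ cn % 256
          = ((256 * (cn / 256)) ^^^ cn % 256) ^^^ (256 * dn) from by ring_nf; ac_rfl,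
        xor_mul256_add _ _ (by omega), show 256 * (cn / 256) + cn % 256 = cn from by omega]
    ring_nf
  calc nloop 8 (cn ^^^ dn * 256)
      = nloop 8 (((cn / 256 ^^^ dn) <<< 8) ^^^ cn % 256) := by rw [harg]
    _ = nloop 8 ((cn / 256 ^^^ dn) <<< 8) ^^^ (cn % 256 * 2 ^ 8) :=
        nloop_split 8 _ _ (by have := Nat.mod_lt cn (y := 256) (by omega); norm_num; omega)
    _ = (cn % 256 * 256) ^^^ nloop 8 ((cn / 256 ^^^ dn) <<< 8) := by
        norm_num [Nat.xor_comm]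

-- cast bridges between the Int ports and the Nat model
theorem intShl1 (a : Int) : a <<< (1:Int) = a * 2 := by
  rw [show (1:Int) = ((1:Nat):Int) from rfl, Int.shiftLeft_natCast_right, Int.shiftLeft_eq]
  norm_num

theorem intShl8 (a : Int) : a <<< (8:Int) = a * 256 := by
  rw [show (8:Int) = ((8:Nat):Int) from rfl, Int.shiftLeft_natCast_right, Int.shiftLeft_eq]
  norm_num

theorem intShr8 (a : Int) : a >>> (8:Int) = a / 256 := by
  rw [show (8:Int) = ((8:Nat):Int) from rfl, Int.shiftRight_natCast_right,
      Int.shiftRight_eq_div_pow]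
  norm_num

theorem shl1_natCast (x : Nat) : ((x:Int)) <<< (1:Int) = ((x <<< 1 : Nat) : Int) := by
  rw [intShl1, Nat.shiftLeft_eq]; push_cast; ring

theorem shl8_natCast (x : Nat) : ((x:Int)) <<< (8:Int) = ((x <<< 8 : Nat) : Int) := by
  rw [intShl8, Nat.shiftLeft_eq]; push_cast; ring

theorem body_natCast (x : Nat) :
    (if PySem.Int.band (↑x) 32768 ≠ 0 then
      PySem.Int.band (PySem.Int.bxor ((↑x : Int) <<< (1:Int)) 4129) 65535
    else
      PySem.Int.band ((↑x : Int) <<< (1:Int)) 65535) = ((nstep x : Nat) : Int) := by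
  have h32 : PySem.Int.band (↑x) 32768 = ((x &&& 32768 : Nat) : Int) := by
    exact_mod_cast PySem.Int.band_natCast x 32768
  have hs : ((x:Int) <<< (1:Int)) = ((x <<< 1 : Nat) : Int) := shl1_natCast x
  have hx : PySem.Int.bxor (((x <<< 1 : Nat) : Int)) 4129 = (((x <<< 1) ^^^ 4129 : Nat) : Int) := by
    exact_mod_cast PySem.Int.bxor_natCast (x <<< 1) 4129
  have hb1 : PySem.Int.band ((((x <<< 1) ^^^ 4129 : Nat)) : Int) 65535
      = ((((x <<< 1) ^^^ 4129) &&& 65535 : Nat) : Int) := by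
    exact_mod_cast PySem.Int.band_natCast ((x <<< 1) ^^^ 4129) 65535
  have hb2 : PySem.Int.band (((x <<< 1 : Nat)) : Int) 65535 = (((x <<< 1) &&& 65535 : Nat) : Int) := by
    exact_mod_cast PySem.Int.band_natCast (x <<< 1) 65535
  rw [hs, h32, hx, hb1, hb2]
  unfold nstep
  by_cases hc : x &&& 32768 ≠ 0
  · rw [if_pos (by exact_mod_cast Int.natCast_ne_zero.mpr hc), if_pos hc]
  · rw [if_neg (by simpa using (by omega : x &&& 32768 = 0)), if_neg hc]

theorem foldl_pyRange8_natCast (x : Nat) :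
    (PySem.List.pyRange 0 8 1).foldl (fun v _i =>
      if PySem.Int.band v 32768 ≠ 0 then
        PySem.Int.band (PySem.Int.bxor (v <<< (1:Int)) 4129) 65535
      else
        PySem.Int.band (v <<< (1:Int)) 65535) (↑x) = ((nloop 8 x : Nat) : Int) := by
  rw [show (PySem.List.pyRange 0 8 1) = [0,1,2,3,4,5,6,7] from by decide]
  simp only [List.foldl, body_natCast]
  rfl

-- ===== VERDICT (by name: the statement is the Claim_ definition above) =====
theorem crc_xmodem_update_py_spec : Claim_equal_crc_xmodem_update_py := by
  intro crc data _
  unfold Spec_crc_xmodem_update_py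
  -- A side
  have hA : crc_xmodem_update_py crc data
      = ((nloop 8 ((crc % 65536).toNat ^^^ (data % 256).toNat * 256) : Nat) : Int) := by
    unfold crc_xmodem_update_py
    rw [intShl8, band_65535, bxor_emod_65536,
        show ((data * 256) % 65536).toNat = (data % 256).toNat * 256 from by omega,
        foldl_pyRange8_natCast]
  -- B side

  have hidx : PySem.Int.band (PySem.Int.bxor (crc >>> (8:Int)) data) 255
      = ((((crc % 65536).toNat / 256 ^^^ (data % 256).toNat : Nat)) : Int) := by
    rw [intShr8, band_255, bxor_emod_256,
        show ((crc / 256) % 256).toNat = (crc % 65536).toNat / 256 from by omega]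
  have hhi : (crc % 65536).toNat / 256 ^^^ (data % 256).toNat < 256 :=
    Nat.xor_lt_two_pow (n := 8) (by omega) (by omega)
  have hB : crc_xmodem_update_py_alt crc data
      = (((((crc % 65536).toNat % 256 * 256) ^^^
          nloop 8 (((crc % 65536).toNat / 256 ^^^ (data % 256).toNat) <<< 8) : Nat)) : Int) := by
    unfold crc_xmodem_update_py_alt crcTable
    rw [hidx,
        PySem.List.pyGetD_map_pyRange_of_nonneg crcTableEntry 256 _ 0
          (by positivity) (by exact_mod_cast hhi)]
    unfold crcTableEntry
    rw [shl8_natCast, foldl_pyRange8_natCast, intShl8, band_mul256_65280,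
        show (crc % 256) * 256 = (((crc % 65536).toNat % 256 * 256 : Nat) : Int) from by omega]
    exact_mod_cast PySem.Int.bxor_natCast ((crc % 65536).toNat % 256 * 256)
      (nloop 8 (((crc % 65536).toNat / 256 ^^^ (data % 256).toNat) <<< 8))
  rw [hA, hB, nloop8_table]
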